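-- pv_equiv track=rewrite | github.com/AndreasKaratzas/vllm-internal-project-dashboard | scripts/vllm/collect_analytics.py | _result_status_to_job_state
-- ===== SOURCE A (Python) =====
-- def _result_status_to_job_state(statuses: list[str]) -> str:
--     """Collapse one job's parsed test rows into a single analytics state."""
--     lowered = {str(s or "").lower() for s in statuses}
--     if lowered & {"failed", "error", "timed_out", "broken", "canceled"}:
--         return "failed"
--     if lowered & {"passed", "xpassed"}:
--         return "passed"
--     if lowered & {"skipped", "xfailed"}:
--         return "skipped"
--     return "unknown"
-- ===== SOURCE B (Python) =====
-- _RANK = {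
--     "failed": 0, "error": 0, "timed_out": 0, "broken": 0, "canceled": 0,
--     "passed": 1, "xpassed": 1,
--     "skipped": 2, "xfailed": 2,
-- }
-- _STATE = ["failed", "passed", "skipped"]
--
--
-- def _result_status_to_job_state(statuses: list[str]) -> str:
--     """Collapse one job's parsed test rows into a single analytics state."""
--     best = 3
--     for s in statuses:
--         r = _RANK.get(str(s or "").lower(), 3)
--         if r < best:
--             best = r
--     return _STATE[best] if best < 3 else "unknown"
-- ===== Notes on version B (the rewrite author's own statement) =====
-- stated objective: alternative
-- what changed: Replaces the set comprehension plus three set-intersection tests with a single reducing pass that maps each normalized status to a priority rank and keeps the minimum, translating it to the state at the end.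
import Mathlib
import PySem

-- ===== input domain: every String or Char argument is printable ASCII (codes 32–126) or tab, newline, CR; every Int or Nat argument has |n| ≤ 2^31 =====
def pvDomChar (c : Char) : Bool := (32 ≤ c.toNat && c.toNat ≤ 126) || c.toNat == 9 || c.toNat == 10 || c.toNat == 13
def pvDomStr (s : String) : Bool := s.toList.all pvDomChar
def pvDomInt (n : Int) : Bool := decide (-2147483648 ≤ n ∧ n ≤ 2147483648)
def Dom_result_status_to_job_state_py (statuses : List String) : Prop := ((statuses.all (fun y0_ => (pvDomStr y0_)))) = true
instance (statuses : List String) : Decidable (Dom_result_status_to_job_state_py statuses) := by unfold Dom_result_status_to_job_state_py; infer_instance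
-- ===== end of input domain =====

-- B replaces the set comprehension plus three set-intersection tests with one reducing
-- pass that keeps the minimum priority rank of the normalized statuses (alternative).

-- ===== PORT A =====
def pvFailStatuses : List String := ["failed", "error", "timed_out", "broken", "canceled"]
def pvPassStatuses : List String := ["passed", "xpassed"]
def pvSkipStatuses : List String := ["skipped", "xfailed"]

-- str(s or "") on a str argument: "" if s is empty (falsy), else s itself
def pvNorm (s : String) : String := PySem.Str.lower (if s = "" then "" else s)

def result_status_to_job_state_py (statuses : List String) : String :=
  let lowered : PySem.Set String := PySem.Set.ofList (statuses.map pvNorm)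
  if PySem.Set.inter lowered pvFailStatuses ≠ [] then "failed"
  else if PySem.Set.inter lowered pvPassStatuses ≠ [] then "passed"
  else if PySem.Set.inter lowered pvSkipStatuses ≠ [] then "skipped"
  else "unknown"

-- ===== PORT B =====
def pvRankDict : PySem.Dict String Int :=
  PySem.Dict.ofList [("failed", 0), ("error", 0), ("timed_out", 0), ("broken", 0), ("canceled", 0),
   ("passed", 1), ("xpassed", 1), ("skipped", 2), ("xfailed", 2)]
def pvStateList : List String := ["failed", "passed", "skipped"]

def result_status_to_job_state_py_alt (statuses : List String) : String :=
  let best : Int := statuses.foldl (fun best s =>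
    let r := pvRankDict.getD (PySem.Str.lower (if s = "" then "" else s)) 3
    if r < best then r else best) 3
  if best < 3 then PySem.List.pyGetD pvStateList best "unknown" else "unknown"

-- ===== PRECONDITION & SPEC =====
def Spec_result_status_to_job_state_py (statuses : List String) (out : String) : Prop := out = result_status_to_job_state_py_alt statuses
instance (statuses : List String) (out : String) : Decidable (Spec_result_status_to_job_state_py statuses out) := by unfold Spec_result_status_to_job_state_py; infer_instance

-- ===== CLAIM (what is proved, stated in full; the proofs are below) =====
def Claim_equal_result_status_to_job_state_py : Prop := ∀ (statuses : List String), Dom_result_status_to_job_state_py statuses → Spec_result_status_to_job_state_py statuses (result_status_to_job_state_py statuses)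

-- ===== LEMMAS AND PROOFS =====

def pvRank (s : String) : Int := pvRankDict.getD s 3

lemma pvRank_spec (s : String) :
    pvRank s =
      if s ∈ pvFailStatuses then 0
      else if s ∈ pvPassStatuses then 1
      else if s ∈ pvSkipStatuses then 2 else 3 := by
  have h : pvRankDict = PySem.Dict.mk
      [("failed", 0), ("error", 0), ("timed_out", 0), ("broken", 0), ("canceled", 0),
       ("passed", 1), ("xpassed", 1), ("skipped", 2), ("xfailed", 2)] := by rfl
  rw [pvRank, h, PySem.Dict.getD_eq_get?_getD]
  simp only [PySem.Dict.get?_mk_cons, pvFailStatuses, pvPassStatuses, pvSkipStatuses,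
             List.mem_cons, List.not_mem_nil, or_false, beq_iff_eq]
  split_ifs <;> (try subst_vars) <;> simp_all [PySem.Dict.get?, eq_comm]

lemma pvRank_bounds (s : String) : 0 ≤ pvRank s ∧ pvRank s ≤ 3 := by
  rw [pvRank_spec]; split_ifs <;> omega

def pvStep (b : Int) (s : String) : Int :=
  let r := pvRankDict.getD (PySem.Str.lower (if s = "" then "" else s)) 3
  if r < b then r else b

lemma pvStep_eq (b : Int) (s : String) :
    pvStep b s = if pvRank (pvNorm s) < b then pvRank (pvNorm s) else b := rfl

lemma pvFold_le_init (l : List String) (b : Int) : l.foldl pvStep b ≤ b := by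
  induction l generalizing b with
  | nil => simp
  | cons x xs ih =>
      simp only [List.foldl_cons]
      refine le_trans (ih _) ?_
      rw [pvStep_eq]; split_ifs with h <;> omega

lemma pvFold_nonneg (l : List String) (b : Int) (hb : 0 ≤ b) : 0 ≤ l.foldl pvStep b := by
  induction l generalizing b with
  | nil => simpa
  | cons x xs ih =>
      simp only [List.foldl_cons]
      refine ih _ ?_
      rw [pvStep_eq]; split_ifs with h
      · exact (pvRank_bounds _).1
      · exact hb

lemma pvFold_le_iff (l : List String) (b c : Int) :
    l.foldl pvStep b ≤ c ↔ b ≤ c ∨ ∃ s ∈ l, pvRank (pvNorm s) ≤ c := by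
  induction l generalizing b with
  | nil => simp
  | cons x xs ih =>
      simp only [List.foldl_cons, ih, List.mem_cons]
      rw [pvStep_eq]
      constructor
      · rintro (h | ⟨s, hs, hr⟩)
        · split_ifs at h with hx
          · exact Or.inr ⟨x, Or.inl rfl, h⟩
          · exact Or.inl h
        · exact Or.inr ⟨s, Or.inr hs, hr⟩
      · rintro (h | ⟨s, hs, hr⟩)
        · left; split_ifs with hx <;> omega
        · rcases hs with rfl | hs
          · left; split_ifs with hx <;> omega
          · exact Or.inr ⟨s, hs, hr⟩

lemma pvMem_inter_ne_nil (l : List String) (t : List String) :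
    PySem.Set.inter (PySem.Set.ofList (l.map pvNorm)) t ≠ [] ↔
      ∃ s ∈ l, pvNorm s ∈ t := by
  constructor
  · intro h
    obtain ⟨x, hx⟩ := List.exists_mem_of_ne_nil _ h
    rw [PySem.Set.mem_inter, PySem.Set.mem_ofList, List.mem_map] at hx
    obtain ⟨⟨s, hs, rfl⟩, ht⟩ := hx
    exact ⟨s, hs, ht⟩
  · rintro ⟨s, hs, ht⟩
    exact List.ne_nil_of_mem (a := pvNorm s)
      (by rw [PySem.Set.mem_inter, PySem.Set.mem_ofList, List.mem_map]; exact ⟨⟨s, hs, rfl⟩, ht⟩)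

lemma pvRank_eq_zero_iff (s : String) : pvRank s = 0 ↔ s ∈ pvFailStatuses := by
  rw [pvRank_spec]; split_ifs <;> simp_all

lemma pvRank_le_one_iff (s : String) :
    pvRank s ≤ 1 ↔ s ∈ pvFailStatuses ∨ s ∈ pvPassStatuses := by
  rw [pvRank_spec]; split_ifs <;> simp_all

lemma pvRank_le_two_iff (s : String) :
    pvRank s ≤ 2 ↔ s ∈ pvFailStatuses ∨ s ∈ pvPassStatuses ∨ s ∈ pvSkipStatuses := by
  rw [pvRank_spec]; split_ifs <;> simp_all

-- ===== VERDICT (by name: the statement is the Claim_ definition above) =====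
theorem result_status_to_job_state_py_spec : Claim_equal_result_status_to_job_state_py := by
  intro statuses _
  unfold Spec_result_status_to_job_state_py
  have hA : result_status_to_job_state_py statuses =
      (if PySem.Set.inter (PySem.Set.ofList (statuses.map pvNorm)) pvFailStatuses ≠ [] then "failed"
       else if PySem.Set.inter (PySem.Set.ofList (statuses.map pvNorm)) pvPassStatuses ≠ [] then "passed"
       else if PySem.Set.inter (PySem.Set.ofList (statuses.map pvNorm)) pvSkipStatuses ≠ [] then "skipped"
       else "unknown") := rfl
  have hB : result_status_to_job_state_py_alt statuses =
      (if statuses.foldl pvStep 3 < 3 then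
         PySem.List.pyGetD pvStateList (statuses.foldl pvStep 3) "unknown"
       else "unknown") := rfl
  rw [hA, hB]
  have hub : statuses.foldl pvStep 3 ≤ 3 := pvFold_le_init _ _
  have hlb : 0 ≤ statuses.foldl pvStep 3 := pvFold_nonneg _ _ (by norm_num)
  by_cases c0 : ∃ s ∈ statuses, pvNorm s ∈ pvFailStatuses
  · obtain ⟨s, hs, hmem⟩ := c0
    have h0 : statuses.foldl pvStep 3 ≤ 0 :=
      (pvFold_le_iff _ _ _).mpr (Or.inr ⟨s, hs, le_of_eq ((pvRank_eq_zero_iff _).mpr hmem)⟩)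
    have hm : statuses.foldl pvStep 3 = 0 := le_antisymm h0 hlb
    rw [if_pos ((pvMem_inter_ne_nil _ _).mpr ⟨s, hs, hmem⟩), hm]
    rfl
  · have hn0 : statuses.foldl pvStep 3 ≠ 0 := by
      intro he
      rcases (pvFold_le_iff statuses 3 0).mp (le_of_eq he) with h3 | ⟨s, hs, hr⟩
      · omega
      · exact c0 ⟨s, hs, (pvRank_eq_zero_iff _).mp
          (le_antisymm hr (pvRank_bounds _).1)⟩
    rw [if_neg (fun h => c0 ((pvMem_inter_ne_nil _ _).mp h))]
    by_cases c1 : ∃ s ∈ statuses, pvNorm s ∈ pvPassStatuses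
    · obtain ⟨s, hs, hmem⟩ := c1
      have h1 : statuses.foldl pvStep 3 ≤ 1 :=
        (pvFold_le_iff _ _ _).mpr (Or.inr ⟨s, hs, (pvRank_le_one_iff _).mpr (Or.inr hmem)⟩)
      have hm : statuses.foldl pvStep 3 = 1 := by omega
      rw [if_pos ((pvMem_inter_ne_nil _ _).mpr ⟨s, hs, hmem⟩), hm]
      rfl
    · have hn1 : statuses.foldl pvStep 3 ≠ 1 := by
        intro he
        rcases (pvFold_le_iff statuses 3 1).mp (le_of_eq he) with h3 | ⟨s, hs, hr⟩
        · omega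
        · rcases (pvRank_le_one_iff _).mp hr with hf | hp
          · exact c0 ⟨s, hs, hf⟩
          · exact c1 ⟨s, hs, hp⟩
      rw [if_neg (fun h => c1 ((pvMem_inter_ne_nil _ _).mp h))]
      by_cases c2 : ∃ s ∈ statuses, pvNorm s ∈ pvSkipStatuses
      · obtain ⟨s, hs, hmem⟩ := c2
        have h2 : statuses.foldl pvStep 3 ≤ 2 :=
          (pvFold_le_iff _ _ _).mpr (Or.inr ⟨s, hs, (pvRank_le_two_iff _).mpr (Or.inr (Or.inr hmem))⟩)
        have hm : statuses.foldl pvStep 3 = 2 := by omega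
        rw [if_pos ((pvMem_inter_ne_nil _ _).mpr ⟨s, hs, hmem⟩), hm]
        rfl
      · have hn2 : statuses.foldl pvStep 3 ≠ 2 := by
          intro he
          rcases (pvFold_le_iff statuses 3 2).mp (le_of_eq he) with h3 | ⟨s, hs, hr⟩
          · omega
          · rcases (pvRank_le_two_iff _).mp hr with hf | hp | hk
            · exact c0 ⟨s, hs, hf⟩
            · exact c1 ⟨s, hs, hp⟩
            · exact c2 ⟨s, hs, hk⟩
        rw [if_neg (fun h => c2 ((pvMem_inter_ne_nil _ _).mp h))]
        have hm : statuses.foldl pvStep 3 = 3 := by omega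
        rw [hm]
        rfl
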